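-- pv_equiv track=rewrite | github.com/MilitaoLucas/olex2-gui-setup | olex2-gui-svn/tags/1.2.7/util/pyUtil/PyToolLib/htmlTools.py | getGenericSwitchName
-- ===== SOURCE A (Python) =====
-- def getGenericSwitchName(name):
--   remove_l = ['work-', 'view-', 'info-', 'tools-', 'aio-', 'home-']
--   name_full = name
--   na = name.split("-")
--   if len(na) > 1:
--     for remove in remove_l:
--       if name.startswith(remove):
--         name = name.split(remove,1)[1]
--         break
--   return name
-- ===== SOURCE B (Python) =====
-- KNOWN = {'work-', 'view-', 'info-', 'tools-', 'aio-', 'home-'}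
--
-- def getGenericSwitchName(name):
--   i = name.find('-')
--   if i < 0:
--     return name
--   prefix = name[:i + 1]
--   if prefix in KNOWN:
--     return name[i + 1:]
--   return name
-- ===== Notes on version B (the rewrite author's own statement) =====
-- stated objective: idiomatic
-- what changed: B replaces A's split-then-linear-startswith-scan over the prefix list by computing the candidate prefix once (up to and including the first hyphen) and doing a single membership test in a set of known prefixes, then slicing it off.
import Mathlib
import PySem

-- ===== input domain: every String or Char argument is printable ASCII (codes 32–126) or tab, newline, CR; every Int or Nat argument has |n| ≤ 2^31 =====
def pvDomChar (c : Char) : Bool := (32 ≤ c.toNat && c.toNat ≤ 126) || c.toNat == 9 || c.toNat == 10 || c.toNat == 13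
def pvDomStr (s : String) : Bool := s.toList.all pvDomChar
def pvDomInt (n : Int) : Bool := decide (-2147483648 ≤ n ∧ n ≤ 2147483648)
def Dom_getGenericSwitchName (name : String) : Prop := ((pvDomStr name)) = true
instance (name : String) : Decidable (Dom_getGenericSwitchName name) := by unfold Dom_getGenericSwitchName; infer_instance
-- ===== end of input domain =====

-- B computes the candidate prefix (through the first '-') once and tests it against a set of
-- known prefixes, instead of A's split plus linear startswith scan over the prefix list (idiomatic).

-- ===== PORT A =====
def pvRemoveL : List String := ["work-", "view-", "info-", "tools-", "aio-", "home-"]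

-- the 'for remove in remove_l: if name.startswith(remove): name = name.split(remove,1)[1]; break' loop
def pvLoopA (name : String) : List String → String
  | [] => name
  | r :: rs =>
    if PySem.Str.startswith name r then
      -- name.split(remove,1)[1]; index 1 is always in range here since remove is a prefix of name
      (((PySem.Str.splitMax? name r 1).getD []).getD 1 name)
    else pvLoopA name rs

def getGenericSwitchName (name : String) : String :=
  let na := (PySem.Str.split? name "-").getD []
  if 1 < na.length then pvLoopA name pvRemoveL else name

-- ===== PORT B =====
def pvKnown : PySem.Set String :=
  PySem.Set.ofList ["work-", "view-", "info-", "tools-", "aio-", "home-"]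

def getGenericSwitchName_alt (name : String) : String :=
  let i := PySem.Str.find name "-"
  if i < 0 then name
  else
    let pfx := PySem.Str.slice name none (some (i + 1))
    if pvKnown.contains pfx then PySem.Str.slice name (some (i + 1)) none
    else name

-- ===== PRECONDITION & SPEC =====
def Spec_getGenericSwitchName (name : String) (out : String) : Prop := out = getGenericSwitchName_alt name
instance (name : String) (out : String) : Decidable (Spec_getGenericSwitchName name out) := by unfold Spec_getGenericSwitchName; infer_instance

-- ===== CLAIM (what is proved, stated in full; the proofs are below) =====
def Claim_equal_getGenericSwitchName : Prop := ∀ (name : String), Dom_getGenericSwitchName name → Spec_getGenericSwitchName name (getGenericSwitchName name)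

-- ===== LEMMAS AND PROOFS =====

theorem pv_str_eq {s t : String} (h : s.toList = t.toList) : s = t :=
  String.toList_injective h

theorem pv_toList_ofList (l : List Char) : (String.ofList l).toList = l := by
  simp

-- splitOnMax.go with maxsplit exhausted just flushes the accumulator
theorem pv_goM0 (sep : List Char) (fuel : Nat) (l cur : List Char) (acc : List (List Char)) :
    PySem.Chars.splitOnMax.go sep fuel 0 l cur acc = ((cur.reverse ++ l) :: acc).reverse := by
  cases fuel with
  | zero => simp [PySem.Chars.splitOnMax.go]
  | succ f => cases l with
    | nil => simp [PySem.Chars.splitOnMax.go]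
    | cons c rest => simp [PySem.Chars.splitOnMax.go]

-- s.split(sep, 1) when sep is a (nonempty) prefix of s: ['', the rest]
theorem pv_splitOnMax_prefix (sep rest : List Char) (hne : sep ≠ []) :
    PySem.Chars.splitOnMax (sep ++ rest) sep 1 = [[], rest] := by
  obtain ⟨c, sep', rfl⟩ : ∃ c sep', sep = c :: sep' := by
    cases sep with
    | nil => exact absurd rfl hne
    | cons c s => exact ⟨c, s, rfl⟩
  unfold PySem.Chars.splitOnMax
  norm_num
  rw [PySem.Chars.splitOnMax.go]
  have hpre : (c :: sep').isPrefixOf (c :: (sep' ++ rest)) = true := by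
    rw [List.isPrefixOf_iff_prefix]
    exact ⟨rest, by simp⟩
  simp only [hpre, if_true, if_neg (one_ne_zero)]
  rw [show (1 : Nat) - 1 = 0 from rfl]
  rw [show List.drop (c :: sep').length (c :: (sep' ++ rest)) = rest from by simp]
  rw [pv_goM0]
  simp

-- splitOn.go returns at least acc.length + 1 pieces
theorem pv_goN (sep : List Char) (fuel : Nat) (l cur : List Char) (acc : List (List Char)) :
    acc.length + 1 ≤ (PySem.Chars.splitOn.go sep fuel l cur acc).length := by
  induction fuel generalizing l cur acc with
  | zero => simp [PySem.Chars.splitOn.go]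
  | succ f ih =>
    cases l with
    | nil => simp [PySem.Chars.splitOn.go]
    | cons c rest =>
      rw [PySem.Chars.splitOn.go]
      by_cases hp : sep.isPrefixOf (c :: rest) = true
      · simp only [hp, if_true]
        have := ih (List.drop sep.length (c :: rest)) [] (cur.reverse :: acc)
        simp at this
        omega
      · simp only [hp]
        exact ih rest (c :: cur) acc

-- a string of shape t ++ '-' :: rest splits into at least two pieces on '-'
theorem pv_splitOn_two (t rest : List Char) (fuel : Nat) (cur : List Char) (acc : List (List Char))
    (ht : '-' ∉ t) (hfuel : t.length + 1 ≤ fuel) :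
    acc.length + 2 ≤ (PySem.Chars.splitOn.go ['-'] fuel (t ++ '-' :: rest) cur acc).length := by
  induction t generalizing fuel cur acc with
  | nil =>
    obtain ⟨f, rfl⟩ : ∃ f, fuel = f + 1 := ⟨fuel - 1, by omega⟩
    rw [show ([] : List Char) ++ '-' :: rest = '-' :: rest from rfl]
    rw [PySem.Chars.splitOn.go]
    have hpre : (['-'] : List Char).isPrefixOf ('-' :: rest) = true := by
      rw [List.isPrefixOf_iff_prefix]; exact ⟨rest, rfl⟩
    simp only [hpre, if_true]
    have := pv_goN ['-'] f (List.drop (['-'] : List Char).length ('-' :: rest)) [] (cur.reverse :: acc)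
    simp at this ⊢
    omega
  | cons c t' ih =>
    obtain ⟨f, rfl⟩ : ∃ f, fuel = f + 1 := ⟨fuel - 1, by omega⟩
    rw [show (c :: t') ++ '-' :: rest = c :: (t' ++ '-' :: rest) from rfl]
    rw [PySem.Chars.splitOn.go]
    have hc : c ≠ '-' := fun h => ht (h ▸ List.mem_cons_self)
    have hpre : (['-'] : List Char).isPrefixOf (c :: (t' ++ '-' :: rest)) = false := by
      rw [Bool.eq_false_iff]
      intro h
      rw [List.isPrefixOf_iff_prefix] at h
      obtain ⟨u, hu⟩ := h
      have : '-' = c := by injection hu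
      exact hc this.symm
    simp only [hpre]
    exact ih f (c :: cur) acc (fun h => ht (List.mem_cons_of_mem c h)) (by simp at hfuel ⊢; omega)

-- find on t ++ '-' :: rest with '-' ∉ t finds position t.length
theorem pv_findGo_hit (t rest : List Char) (k : Nat) (ht : '-' ∉ t) :
    PySem.Chars.find.go ['-'] (t ++ '-' :: rest) k = ((k + t.length : Nat) : Int) := by
  induction t generalizing k with
  | nil =>
    rw [show ([] : List Char) ++ '-' :: rest = '-' :: rest from rfl]
    rw [PySem.Chars.find.go]
    have hpre : (['-'] : List Char).isPrefixOf ('-' :: rest) = true := by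
      rw [List.isPrefixOf_iff_prefix]; exact ⟨rest, rfl⟩
    simp [hpre]
  | cons c t' ih =>
    rw [show (c :: t') ++ '-' :: rest = c :: (t' ++ '-' :: rest) from rfl]
    rw [PySem.Chars.find.go]
    have hc : c ≠ '-' := fun h => ht (h ▸ List.mem_cons_self)
    have hpre : (['-'] : List Char).isPrefixOf (c :: (t' ++ '-' :: rest)) = false := by
      rw [Bool.eq_false_iff]
      intro h
      rw [List.isPrefixOf_iff_prefix] at h
      obtain ⟨u, hu⟩ := h
      have : '-' = c := by injection hu
      exact hc this.symm
    simp only [hpre]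
    rw [ih (k + 1) (fun h => ht (List.mem_cons_of_mem c h))]
    simp only [List.length_cons]
    push_cast
    ring

-- A's guard is true on a hit
theorem pv_guard_true (name : String) (t rest : List Char) (ht : '-' ∉ t)
    (hs : name.toList = t ++ '-' :: rest) :
    1 < ((PySem.Str.split? name "-").getD []).length := by
  have hsp : PySem.Str.split? name "-" =
      some (List.map String.ofList (PySem.Chars.splitOn name.toList ['-'])) := by
    have hd : ("-" : String).toList = ['-'] := by decide
    simp [PySem.Str.split?, PySem.Chars.split?, hd]
  rw [hsp]
  simp only [Option.getD_some, List.length_map]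
  unfold PySem.Chars.splitOn
  rw [hs]
  have h2 := pv_splitOn_two t rest ((t ++ '-' :: rest).length + 1) [] [] ht (by simp)
  have h3 : 2 ≤ (PySem.Chars.splitOn.go ['-'] ((t ++ '-' :: rest).length + 1)
      (t ++ '-' :: rest) [] []).length := by
    simpa only [List.length_nil, Nat.zero_add] using h2
  omega

-- A's splitMax expression on a hit
theorem pv_splitMax_val (name p : String) (rest : List Char)
    (hps : name.toList = p.toList ++ rest) (hp0 : p.toList ≠ []) :
    (((PySem.Str.splitMax? name p 1).getD []).getD 1 name) = String.ofList rest := by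
  have hsm : PySem.Str.splitMax? name p 1 =
      some (List.map String.ofList (PySem.Chars.splitOnMax name.toList p.toList 1)) := by
    simp [PySem.Str.splitMax?, PySem.Chars.splitMax?, List.isEmpty_iff, hp0]
  rw [hsm]
  simp only [Option.getD_some]
  rw [hps, pv_splitOnMax_prefix p.toList rest hp0]
  simp [List.getD]

-- B's value on a hit
theorem pv_valB (name p : String) (t rest : List Char)
    (hp : p.toList = t ++ ['-']) (ht : '-' ∉ t)
    (hs : name.toList = t ++ '-' :: rest)
    (hk : pvKnown.contains p = true) :
    getGenericSwitchName_alt name = String.ofList rest := by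
  have hfind : PySem.Str.find name "-" = (t.length : Int) := by
    have hd : ("-" : String).toList = ['-'] := by decide
    rw [PySem.Str.find_eq, hd, hs]
    unfold PySem.Chars.find
    simpa using pv_findGo_hit t rest 0 ht
  have hpfx : PySem.Str.slice name none (some ((t.length : Int) + 1)) = p := by
    apply pv_str_eq
    rw [PySem.Str.toList_slice, PySem.Chars.slice_eq_listSlice,
        PySem.List.slice_to _ (by omega : (0:Int) ≤ (t.length : Int) + 1)]
    rw [show ((t.length : Int) + 1).toNat = t.length + 1 from by omega]
    rw [hs, hp]
    rw [show t ++ '-' :: rest = (t ++ ['-']) ++ rest from by simp]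
    rw [show t.length + 1 = (t ++ ['-']).length from by simp]
    exact List.take_left
  have hdrop : PySem.Str.slice name (some ((t.length : Int) + 1)) none = String.ofList rest := by
    apply pv_str_eq
    rw [PySem.Str.toList_slice, PySem.Chars.slice_eq_listSlice,
        PySem.List.slice_from _ (by omega : (0:Int) ≤ (t.length : Int) + 1),
        pv_toList_ofList]
    rw [show ((t.length : Int) + 1).toNat = t.length + 1 from by omega]
    rw [hs]
    rw [show t ++ '-' :: rest = (t ++ ['-']) ++ rest from by simp]
    rw [show t.length + 1 = (t ++ ['-']).length from by simp]
    exact List.drop_left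
  simp only [getGenericSwitchName_alt, hfind]
  rw [if_neg (by omega : ¬ ((t.length : Int) < 0))]
  rw [hpfx, hk]
  simp only [if_true]
  exact hdrop

-- A = B whenever some known prefix matches and the loop stops at it
theorem pv_hit (name p : String) (t : List Char)
    (hp : p.toList = t ++ ['-']) (ht : '-' ∉ t) (hk : pvKnown.contains p = true)
    (hsw : PySem.Str.startswith name p = true)
    (hloop : pvLoopA name pvRemoveL = (((PySem.Str.splitMax? name p 1).getD []).getD 1 name)) :
    getGenericSwitchName name = getGenericSwitchName_alt name := by
  have hpre : p.toList <+: name.toList := by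
    rw [PySem.Str.startswith_eq] at hsw
    exact (PySem.Chars.startswith_iff _ _).mp hsw
  obtain ⟨rest, hres⟩ := hpre
  have hs : name.toList = t ++ '-' :: rest := by rw [← hres, hp]; simp
  have hps : name.toList = p.toList ++ rest := hres.symm
  simp only [getGenericSwitchName]
  rw [if_pos (pv_guard_true name t rest ht hs), hloop,
      pv_splitMax_val name p rest hps (by rw [hp]; simp),
      pv_valB name p t rest hp ht hs hk]

-- ===== VERDICT (by name: the statement is the Claim_ definition above) =====
theorem getGenericSwitchName_spec : Claim_equal_getGenericSwitchName := by
  intro name _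
  unfold Spec_getGenericSwitchName
  by_cases h1 : PySem.Str.startswith name "work-" = true
  · exact pv_hit name "work-" ['w','o','r','k'] (by decide) (by decide)
      (by decide) h1 (by simp only [pvLoopA, pvRemoveL]; rw [if_pos h1])
  by_cases h2 : PySem.Str.startswith name "view-" = true
  · exact pv_hit name "view-" ['v','i','e','w'] (by decide) (by decide)
      (by decide) h2 (by simp only [pvLoopA, pvRemoveL]; rw [if_neg h1, if_pos h2])
  by_cases h3 : PySem.Str.startswith name "info-" = true
  · exact pv_hit name "info-" ['i','n','f','o'] (by decide) (by decide)
      (by decide) h3 (by simp only [pvLoopA, pvRemoveL]; rw [if_neg h1, if_neg h2, if_pos h3])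
  by_cases h4 : PySem.Str.startswith name "tools-" = true
  · exact pv_hit name "tools-" ['t','o','o','l','s'] (by decide) (by decide)
      (by decide) h4 (by simp only [pvLoopA, pvRemoveL]; rw [if_neg h1, if_neg h2, if_neg h3, if_pos h4])
  by_cases h5 : PySem.Str.startswith name "aio-" = true
  · exact pv_hit name "aio-" ['a','i','o'] (by decide) (by decide)
      (by decide) h5 (by simp only [pvLoopA, pvRemoveL]; rw [if_neg h1, if_neg h2, if_neg h3, if_neg h4, if_pos h5])
  by_cases h6 : PySem.Str.startswith name "home-" = true
  · exact pv_hit name "home-" ['h','o','m','e'] (by decide) (by decide)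
      (by decide) h6 (by simp only [pvLoopA, pvRemoveL]; rw [if_neg h1, if_neg h2, if_neg h3, if_neg h4, if_neg h5, if_pos h6])
  -- no known prefix matches: both sides return name unchanged
  have hA : getGenericSwitchName name = name := by
    have hloop : pvLoopA name pvRemoveL = name := by
      simp only [pvLoopA, pvRemoveL]
      rw [if_neg h1, if_neg h2, if_neg h3, if_neg h4, if_neg h5, if_neg h6]
    simp only [getGenericSwitchName, hloop]
    split <;> rfl
  rw [hA]
  by_cases hi : PySem.Str.find name "-" < 0
  · simp only [getGenericSwitchName_alt, if_pos hi]
  · have hpref : (PySem.Str.slice name none (some (PySem.Str.find name "-" + 1))).toList <+: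
        name.toList := by
      rw [PySem.Str.toList_slice, PySem.Chars.slice_eq_listSlice,
          PySem.List.slice_to _ (by omega : (0:Int) ≤ PySem.Str.find name "-" + 1)]
      exact List.take_prefix _ _
    have hc : pvKnown.contains (PySem.Str.slice name none (some (PySem.Str.find name "-" + 1)))
        = false := by
      rw [Bool.eq_false_iff]
      intro hcc
      have hmem := (PySem.Set.contains_iff _ _).mp hcc
      rw [pvKnown, PySem.Set.mem_ofList] at hmem
      have hsw : ∀ q : String,
          (PySem.Str.slice name none (some (PySem.Str.find name "-" + 1))) = q →
          PySem.Str.startswith name q = true := by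
        intro q hq
        rw [PySem.Str.startswith_eq]
        exact (PySem.Chars.startswith_iff _ _).mpr (hq ▸ hpref)
      simp only [List.mem_cons, List.not_mem_nil, or_false] at hmem
      rcases hmem with h | h | h | h | h | h
      · exact h1 (hsw _ h)
      · exact h2 (hsw _ h)
      · exact h3 (hsw _ h)
      · exact h4 (hsw _ h)
      · exact h5 (hsw _ h)
      · exact h6 (hsw _ h)
    simp only [getGenericSwitchName_alt, if_neg hi, hc, Bool.false_eq_true, if_false]
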